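-- pv_equiv track=rewrite | github.com/generic-glitch/GoogleFoobar | ChessTravel.py | getClosestSolution
-- ===== SOURCE A (Python) =====
-- def getClosestSolution(oNum, dest, sol):
--   dRow = getRow(dest)
--   dCol = getCol(dest)
--   cSol = sol[0]
--   cTot = abs(dRow - cSol[0]) + abs(dCol-cSol[1])
--   for s in sol:
--     if getNum(s[0], s[1]) == dest:
--       return s
--   for s in sol:
--     sCol = s[1]
--     sRow = s[0]
--     if (abs(dRow-sRow) == 2) and (abs(dCol-sCol) == 1):
--       return s
--     elif (abs(dRow-sRow) == 1) and (abs(dCol-sCol) == 2):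
--       return s
--   for s in sol:
--     sCol = s[1]
--     sRow = s[0]
--     if getNum(s[0], s[1]) == oNum:
--       continue
--     else:
--       if sRow == dRow and (abs(dCol - sCol) <= 2):
--         return s
--       elif dCol == sCol and (abs(dRow - sRow) <= 2):
--         return s
--   for s in sol:
--     sCol = s[1]
--     sRow = s[0]
--     if getNum(s[0], s[1]) != oNum:
--       if (abs(dRow - sRow) + abs(dCol - sCol)) <= cTot:
--         cSol = s
--         cTot = (abs(dRow - sRow) + abs(dCol - sCol))
--   return cSol
--
-- def getNum(row, column):
--   return ((row + 1) * (8)) - (8 - column)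
--
-- def getRow(num):
--   num2 = num
--   amount = 0
--   while num2 > 7:
--     num2 -= 8
--     amount += 1
--   return amount
--
-- def getCol(num):
--   return num % 8
-- ===== SOURCE B (Python) =====
-- def getClosestSolution(oNum, dest, sol):
--   # single pass: track first exact / knight / line candidate and best-Manhattan fallback
--   dRow = dest // 8 if dest > 7 else 0
--   dCol = dest % 8
--   exact = knight = line = None
--   best = sol[0]
--   bestD = abs(dRow - best[0]) + abs(dCol - best[1])
--   for s in sol:
--     num = 8 * s[0] + s[1]
--     dr = abs(dRow - s[0])
--     dc = abs(dCol - s[1])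
--     if exact is None and num == dest:
--       exact = s
--     if knight is None and dr * dc == 2:
--       knight = s
--     if num != oNum:
--       if line is None and ((dr == 0 and dc <= 2) or (dc == 0 and dr <= 2)):
--         line = s
--       if dr + dc <= bestD:
--         best, bestD = s, dr + dc
--   if exact is not None:
--     return exact
--   if knight is not None:
--     return knight
--   if line is not None:
--     return line
--   return best
-- ===== Notes on version B (the rewrite author's own statement) =====
-- stated objective: faster
-- what changed: Replaces A's four sequential scans (plus getRow's repeated-subtraction loop and getNum recomputation per tier) with one single pass that simultaneously tracks the first exact match, first knight-offset match, first same-row/column match and the best-Manhattan fallback, with getRow computed in closed form (dest // 8).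
import Mathlib
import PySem

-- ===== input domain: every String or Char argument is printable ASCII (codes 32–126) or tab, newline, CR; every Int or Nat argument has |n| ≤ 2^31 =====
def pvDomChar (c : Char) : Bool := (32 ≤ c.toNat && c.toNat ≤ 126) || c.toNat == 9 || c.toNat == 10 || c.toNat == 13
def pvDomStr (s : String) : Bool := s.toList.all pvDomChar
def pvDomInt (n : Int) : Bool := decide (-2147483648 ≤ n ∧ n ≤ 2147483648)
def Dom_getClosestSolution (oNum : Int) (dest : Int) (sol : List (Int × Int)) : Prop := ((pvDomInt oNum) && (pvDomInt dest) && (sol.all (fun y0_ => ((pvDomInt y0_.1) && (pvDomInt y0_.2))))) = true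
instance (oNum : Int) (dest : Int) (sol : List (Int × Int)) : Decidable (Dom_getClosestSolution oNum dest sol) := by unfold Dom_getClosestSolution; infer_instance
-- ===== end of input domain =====

-- B merges A's four scans into one pass tracking the four candidates, and computes getRow in closed form.

-- ===== PORT A =====
def pyGetNumA (row col : Int) : Int := (row + 1) * 8 - (8 - col)

def pyGetRowLoopA (num2 amount : Int) : Int :=
  if 7 < num2 then pyGetRowLoopA (num2 - 8) (amount + 1) else amount
termination_by num2.toNat
decreasing_by omega

def pyGetRowA (num : Int) : Int := pyGetRowLoopA num 0

def loop1A (dest : Int) : List (Int × Int) → Option (Int × Int)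
  | [] => none
  | s :: t => if pyGetNumA s.1 s.2 = dest then some s else loop1A dest t

def loop2A (dRow dCol : Int) : List (Int × Int) → Option (Int × Int)
  | [] => none
  | s :: t =>
    if |dRow - s.1| = 2 ∧ |dCol - s.2| = 1 then some s
    else if |dRow - s.1| = 1 ∧ |dCol - s.2| = 2 then some s
    else loop2A dRow dCol t

def loop3A (oNum dRow dCol : Int) : List (Int × Int) → Option (Int × Int)
  | [] => none
  | s :: t =>
    if pyGetNumA s.1 s.2 = oNum then loop3A oNum dRow dCol t
    else if s.1 = dRow ∧ |dCol - s.2| ≤ 2 then some s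
    else if dCol = s.2 ∧ |dRow - s.1| ≤ 2 then some s
    else loop3A oNum dRow dCol t

def loop4A (oNum dRow dCol : Int) (acc : (Int × Int) × Int) : List (Int × Int) → (Int × Int) × Int
  | [] => acc
  | s :: t =>
    if pyGetNumA s.1 s.2 ≠ oNum ∧ |dRow - s.1| + |dCol - s.2| ≤ acc.2
    then loop4A oNum dRow dCol (s, |dRow - s.1| + |dCol - s.2|) t
    else loop4A oNum dRow dCol acc t

def getClosestSolution (oNum : Int) (dest : Int) (sol : List (Int × Int)) : Int × Int :=
  let dRow := pyGetRowA dest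
  let dCol := PySem.Int.mod dest 8
  let cSol := sol.headD (0, 0)     -- sol[0]; Pre_ excludes sol = [] (IndexError)
  let cTot := |dRow - cSol.1| + |dCol - cSol.2|
  match loop1A dest sol with
  | some s => s
  | none =>
    match loop2A dRow dCol sol with
    | some s => s
    | none =>
      match loop3A oNum dRow dCol sol with
      | some s => s
      | none => (loop4A oNum dRow dCol (cSol, cTot) sol).1

-- ===== PORT B =====
def rowB (num : Int) : Int := if 7 < num then PySem.Int.floordiv num 8 else 0

def stepB (oNum dRow dCol dest : Int)
    (st : Option (Int × Int) × Option (Int × Int) × Option (Int × Int) × ((Int × Int) × Int))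
    (s : Int × Int) :
    Option (Int × Int) × Option (Int × Int) × Option (Int × Int) × ((Int × Int) × Int) :=
  let num := 8 * s.1 + s.2
  let dr := |dRow - s.1|
  let dc := |dCol - s.2|
  let e := if st.1 = none ∧ num = dest then some s else st.1
  let k := if st.2.1 = none ∧ dr * dc = 2 then some s else st.2.1
  let li := if num ≠ oNum ∧ st.2.2.1 = none ∧ ((dr = 0 ∧ dc ≤ 2) ∨ (dc = 0 ∧ dr ≤ 2))
            then some s else st.2.2.1
  let bp := if num ≠ oNum ∧ dr + dc ≤ st.2.2.2.2 then (s, dr + dc) else st.2.2.2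
  (e, k, li, bp)

def getClosestSolution_alt (oNum : Int) (dest : Int) (sol : List (Int × Int)) : Int × Int :=
  let dRow := rowB dest
  let dCol := PySem.Int.mod dest 8
  let b0 := sol.headD (0, 0)
  let st := sol.foldl (stepB oNum dRow dCol dest)
      (none, none, none, (b0, |dRow - b0.1| + |dCol - b0.2|))
  match st.1 with
  | some s => s
  | none =>
    match st.2.1 with
    | some s => s
    | none =>
      match st.2.2.1 with
      | some s => s
      | none => st.2.2.2.1

-- ===== PRECONDITION & SPEC =====
-- Pre_ excludes only sol = [], where the Python A raises IndexError on sol[0].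
def Pre_getClosestSolution (oNum : Int) (dest : Int) (sol : List (Int × Int)) : Prop := sol ≠ []
instance (oNum : Int) (dest : Int) (sol : List (Int × Int)) : Decidable (Pre_getClosestSolution oNum dest sol) := by unfold Pre_getClosestSolution; infer_instance

def pvWitness_getClosestSolution : Int × Int × (List (Int × Int)) := (0, 27, [(1, 2), (3, 3)])

def Spec_getClosestSolution (oNum : Int) (dest : Int) (sol : List (Int × Int)) (out : Int × Int) : Prop := out = getClosestSolution_alt oNum dest sol
instance (oNum : Int) (dest : Int) (sol : List (Int × Int)) (out : Int × Int) : Decidable (Spec_getClosestSolution oNum dest sol out) := by unfold Spec_getClosestSolution; infer_instance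

-- ===== CLAIM (what is proved, stated in full; the proofs are below) =====
def Claim_equal_getClosestSolution : Prop := ∀ (oNum : Int) (dest : Int) (sol : List (Int × Int)), Dom_getClosestSolution oNum dest sol → Pre_getClosestSolution oNum dest sol → Spec_getClosestSolution oNum dest sol (getClosestSolution oNum dest sol)

-- ===== LEMMAS AND PROOFS =====

theorem pyGetNumA_eq (r c : Int) : pyGetNumA r c = 8 * r + c := by
  unfold pyGetNumA; ring

theorem rowB_eq (m : Int) : rowB m = if 7 < m then m / 8 else 0 := by
  unfold rowB
  by_cases hm : 7 < m
  · rw [if_pos hm, if_pos hm, PySem.Int.floordiv_eq_ediv_of_pos (by norm_num)]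
  · rw [if_neg hm, if_neg hm]

theorem rowLoop_eq (n a : Int) : pyGetRowLoopA n a = a + rowB n := by
  rw [pyGetRowLoopA]
  by_cases h : 7 < n
  · simp only [if_pos h]
    rw [rowLoop_eq (n - 8) (a + 1), rowB_eq, rowB_eq]
    split_ifs <;> omega
  · simp only [if_neg h]
    rw [rowB_eq, if_neg h]
    omega
termination_by n.toNat
decreasing_by omega

theorem knight_iff (x y : Int) (hx : 0 ≤ x) (hy : 0 ≤ y) :
    x * y = 2 ↔ (x = 2 ∧ y = 1) ∨ (x = 1 ∧ y = 2) := by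
  constructor
  · intro h
    have hy0 : y ≠ 0 := by rintro rfl; simp at h
    have hx0 : x ≠ 0 := by rintro rfl; simp at h
    have hy1 : 1 ≤ y := by omega
    have hx1 : 1 ≤ x := by omega
    have hx2 : x ≤ 2 := by nlinarith
    interval_cases x <;> omega
  · rintro (⟨hx', hy'⟩ | ⟨hx', hy'⟩) <;> simp [hx', hy']

theorem fold_exact (oNum dRow dCol dest : Int) (l : List (Int × Int))
    (e k li : Option (Int × Int)) (bp : (Int × Int) × Int) :
    (l.foldl (stepB oNum dRow dCol dest) (e, k, li, bp)).1
      = (match e with | some x => some x | none => loop1A dest l) := by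
  induction l generalizing e k li bp with
  | nil => cases e <;> simp [loop1A]
  | cons s t ih =>
    rw [List.foldl_cons, ih]
    cases e with
    | some x => simp [stepB]
    | none =>
      simp only [stepB, loop1A, pyGetNumA_eq]
      by_cases h : 8 * s.1 + s.2 = dest <;> simp [h]

theorem fold_knight (oNum dRow dCol dest : Int) (l : List (Int × Int))
    (e k li : Option (Int × Int)) (bp : (Int × Int) × Int) :
    (l.foldl (stepB oNum dRow dCol dest) (e, k, li, bp)).2.1
      = (match k with | some x => some x | none => loop2A dRow dCol l) := by
  induction l generalizing e k li bp with
  | nil => cases k <;> simp [loop2A]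
  | cons s t ih =>
    rw [List.foldl_cons, ih]
    cases k with
    | some x => simp [stepB]
    | none =>
      simp only [stepB, loop2A]
      split_ifs with h1 h2 h3 <;> try rfl
      all_goals
        first
        | rfl
        | (exfalso
           rcases (knight_iff _ _ (abs_nonneg (dRow - s.1)) (abs_nonneg (dCol - s.2))).mp
             (by tauto) with hk | hk <;> tauto)
        | (exfalso
           exact (by tauto : ¬ (|dRow - s.1| * |dCol - s.2| = 2))
             ((knight_iff _ _ (abs_nonneg (dRow - s.1)) (abs_nonneg (dCol - s.2))).mpr (by tauto)))

theorem fold_line (oNum dRow dCol dest : Int) (l : List (Int × Int))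
    (e k li : Option (Int × Int)) (bp : (Int × Int) × Int) :
    (l.foldl (stepB oNum dRow dCol dest) (e, k, li, bp)).2.2.1
      = (match li with | some x => some x | none => loop3A oNum dRow dCol l) := by
  induction l generalizing e k li bp with
  | nil => cases li <;> simp [loop3A]
  | cons s t ih =>
    rw [List.foldl_cons, ih]
    cases li with
    | some x => simp [stepB]
    | none =>
      simp only [stepB, loop3A, pyGetNumA_eq]
      rcases abs_cases (dRow - s.1) with ⟨e1, s1⟩ | ⟨e1, s1⟩ <;>
        rcases abs_cases (dCol - s.2) with ⟨e2, s2⟩ | ⟨e2, s2⟩ <;>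
        rw [e1, e2] <;> split_ifs <;> simp only [true_and] at * <;> first | rfl | omega

theorem fold_best (oNum dRow dCol dest : Int) (l : List (Int × Int))
    (e k li : Option (Int × Int)) (bp : (Int × Int) × Int) :
    (l.foldl (stepB oNum dRow dCol dest) (e, k, li, bp)).2.2.2
      = loop4A oNum dRow dCol bp l := by
  induction l generalizing e k li bp with
  | nil => simp [loop4A]
  | cons s t ih =>
    rw [List.foldl_cons, ih]
    simp only [stepB, loop4A, pyGetNumA_eq]
    by_cases h : 8 * s.1 + s.2 ≠ oNum ∧ |dRow - s.1| + |dCol - s.2| ≤ bp.2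
    · simp [h]
    · simp [h]

-- ===== VERDICT (by name: the statement is the Claim_ definition above) =====
theorem getClosestSolution_spec : Claim_equal_getClosestSolution := by
  intro oNum dest sol _ _
  unfold Spec_getClosestSolution getClosestSolution getClosestSolution_alt
  have hrow : pyGetRowA dest = rowB dest := by
    unfold pyGetRowA
    rw [rowLoop_eq]
    omega
  simp only [hrow, fold_exact, fold_knight, fold_line, fold_best]
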